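-- pv_equiv track=rewrite | github.com/mudstrand/daily_devotional | parse_messages/code/check_prayers.py | locate_line_number
-- ===== SOURCE A (Python) =====
-- from typing import Any, Iterable, Tuple, List, Union, Optional
--
-- def locate_line_number(json_text: str, value: str) -> Optional[int]:
--     """
--     Best-effort line number guess: find the first line that contains both "prayer"
--     and a short non-empty snippet of the value. Works best on pretty-printed JSON.
--     """
--     lines = json_text.splitlines()
--     needle_key = '"prayer"'
--
--     snippet = ""
--     if isinstance(value, str):
--         for part in value.splitlines():
--             if part.strip():
--                 snippet = part[:60]
--                 break
--
--     if snippet: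
--         for idx, line in enumerate(lines, start=1):
--             if needle_key in line and snippet in line:
--                 return idx
--
--     for idx, line in enumerate(lines, start=1):
--         if needle_key in line:
--             return idx
--     return None
-- ===== SOURCE B (Python) =====
-- def locate_line_number(json_text: str, value: str):
--     """Single pass: track first key-only match and first key+snippet match together."""
--     needle_key = '"prayer"'
--
--     snippet = ""
--     if isinstance(value, str):
--         for part in value.splitlines():
--             if part.strip():
--                 snippet = part[:60]
--                 break
--
--     first_key = None
--     first_both = None
--     for idx, line in enumerate(json_text.splitlines(), start=1):
--         if needle_key in line:
--             if first_key is None: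
--                 first_key = idx
--             if snippet and first_both is None and snippet in line:
--                 first_both = idx
--     if snippet and first_both is not None:
--         return first_both
--     return first_key
-- ===== Notes on version B (the rewrite author's own statement) =====
-- stated objective: alternative
-- what changed: Replaced A's two sequential scans over the lines (first for key+snippet, then for key only) with a single pass that maintains both the first key-only index and the first key-and-snippet index, choosing between them at the end.
import Mathlib
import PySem

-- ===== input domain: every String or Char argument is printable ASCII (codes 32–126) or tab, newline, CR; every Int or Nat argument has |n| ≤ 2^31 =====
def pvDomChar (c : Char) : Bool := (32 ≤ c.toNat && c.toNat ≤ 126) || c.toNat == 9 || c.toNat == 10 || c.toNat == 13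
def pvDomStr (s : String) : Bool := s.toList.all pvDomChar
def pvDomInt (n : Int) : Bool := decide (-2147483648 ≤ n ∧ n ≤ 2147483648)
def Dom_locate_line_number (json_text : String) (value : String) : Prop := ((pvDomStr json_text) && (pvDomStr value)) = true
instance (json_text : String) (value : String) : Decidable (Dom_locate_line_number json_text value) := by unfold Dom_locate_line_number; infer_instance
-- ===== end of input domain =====

-- B is one pass over the lines instead of A's two sequential scans; same result, no speed claim.

-- ===== PORT A =====
-- snippet preamble (shared verbatim by both Pythons): first non-blank line of value, sliced to 60 chars
def pvFirstSnippet : List String → String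
  | [] => ""
  | p :: ps =>
    if PySem.Str.strip p ≠ "" then PySem.Str.slice p none (some 60)
    else pvFirstSnippet ps

-- A's first loop: first line containing both needle_key and snippet
def pvScanBoth (needle_key snippet : String) : List String → Int → Option Int
  | [], _ => none
  | l :: ls, idx =>
    if PySem.Str.isIn needle_key l && PySem.Str.isIn snippet l then some idx
    else pvScanBoth needle_key snippet ls (idx + 1)

-- A's second loop: first line containing needle_key
def pvScanKey (needle_key : String) : List String → Int → Option Int
  | [], _ => none
  | l :: ls, idx =>
    if PySem.Str.isIn needle_key l then some idx
    else pvScanKey needle_key ls (idx + 1)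

def locate_line_number (json_text : String) (value : String) : Option Int :=
  let lines := PySem.Str.splitlines json_text
  let needle_key := "\"prayer\""
  let snippet := pvFirstSnippet (PySem.Str.splitlines value)
  if snippet ≠ "" then
    match pvScanBoth needle_key snippet lines 1 with
    | some idx => some idx
    | none => pvScanKey needle_key lines 1
  else pvScanKey needle_key lines 1

-- ===== PORT B =====
-- B's single loop: returns (first_key, first_both) after one pass
def pvAltLoop (needle_key snippet : String) : List String → Int → Option Int → Option Int → Option Int × Option Int
  | [], _, first_key, first_both => (first_key, first_both)
  | l :: ls, idx, first_key, first_both =>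
    if PySem.Str.isIn needle_key l then
      let fk := if first_key.isNone then some idx else first_key
      let fb := if snippet != "" && first_both.isNone && PySem.Str.isIn snippet l then some idx else first_both
      pvAltLoop needle_key snippet ls (idx + 1) fk fb
    else pvAltLoop needle_key snippet ls (idx + 1) first_key first_both

def locate_line_number_alt (json_text : String) (value : String) : Option Int :=
  let needle_key := "\"prayer\""
  let snippet := pvFirstSnippet (PySem.Str.splitlines value)
  let r := pvAltLoop needle_key snippet (PySem.Str.splitlines json_text) 1 none none
  if snippet != "" && r.2.isSome then r.2 else r.1

-- ===== PRECONDITION & SPEC =====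
def Spec_locate_line_number (json_text : String) (value : String) (out : Option Int) : Prop := out = locate_line_number_alt json_text value
instance (json_text : String) (value : String) (out : Option Int) : Decidable (Spec_locate_line_number json_text value out) := by unfold Spec_locate_line_number; infer_instance

-- ===== CLAIM (what is proved, stated in full; the proofs are below) =====
def Claim_equal_locate_line_number : Prop := ∀ (json_text : String) (value : String), Dom_locate_line_number json_text value → Spec_locate_line_number json_text value (locate_line_number json_text value)

-- ===== LEMMAS AND PROOFS =====
-- The single pass computes A's two scans: first_key accumulates pvScanKey, first_both accumulates
-- pvScanBoth (only when snippet is non-empty).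
theorem pvAltLoop_eq (needle_key snippet : String) (ls : List String) (idx : Int)
    (fk fb : Option Int) :
    pvAltLoop needle_key snippet ls idx fk fb =
      (fk.or (pvScanKey needle_key ls idx),
       fb.or (if snippet ≠ "" then pvScanBoth needle_key snippet ls idx else none)) := by
  induction ls generalizing idx fk fb with
  | nil => simp [pvAltLoop, pvScanKey, pvScanBoth]
  | cons l ls ih =>
    simp only [pvAltLoop, pvScanKey, pvScanBoth]
    by_cases hk : PySem.Str.isIn needle_key l = true
    · simp only [hk, if_pos, Bool.true_and, ih]
      by_cases hs : snippet = ""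
      · subst hs; cases fk <;> cases fb <;> simp [Option.or]
      · have hs' : (snippet != "") = true := by simp [hs]
        by_cases hin : PySem.Str.isIn snippet l = true
        · simp only [hs', hin, Bool.true_and, Bool.and_true, if_pos (by trivial : (True : Prop))]
          cases fk <;> cases fb <;> simp [hs, Option.or]
        · simp only [hs', Bool.eq_false_iff.mpr hin]
          cases fk <;> cases fb <;> simp [hs, Option.or]
    · have hk' := Bool.eq_false_iff.mpr hk
      simp only [hk', Bool.false_and, if_neg (by simp : ¬ (false = true)), ih]

-- ===== VERDICT (by name: the statement is the Claim_ definition above) =====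
theorem locate_line_number_spec : Claim_equal_locate_line_number := by
  intro json_text value _
  unfold Spec_locate_line_number locate_line_number locate_line_number_alt
  simp only [pvAltLoop_eq, Option.none_or]
  set lines := PySem.Str.splitlines json_text
  set snippet := pvFirstSnippet (PySem.Str.splitlines value) with hsn
  by_cases hs : snippet = ""
  · simp [hs]
  · have hs' : (snippet != "") = true := by simp [hs]
    simp only [if_pos hs, hs', Bool.true_and]
    cases h : pvScanBoth "\"prayer\"" snippet lines 1 <;> simp
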